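-- pv_equiv track=rewrite | github.com/MilliMoraes/Casamento-de-padroes-TP03 | forca_bruta.py | fbruta
-- ===== SOURCE A (Python) =====
-- def fbruta(texto, padrao):
--     n = len(texto)
--     m = len(padrao)
--     ocorrencias = []
--     comparacoes = 0
--
--     for i in range(n - m + 1):
--         j = 0
--         while j < m:
--             comparacoes += 1
--             if texto[i + j] == padrao[j]:
--                 j += 1
--                 if j == m:
--                     ocorrencias.append(i)
--             else:
--                 break
--
--     return ocorrencias, comparacoes
-- ===== SOURCE B (Python) =====
-- def fbruta(texto, padrao):
--     n = len(texto)
--     m = len(padrao)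
--     if m == 0:
--         return [], 0
--     # breadth-first sieve: keep the start positions still alive and sweep
--     # pattern positions j; each alive position costs one comparison at step j
--     alive = list(range(n - m + 1))
--     comparacoes = 0
--     for j in range(m):
--         comparacoes += len(alive)
--         alive = [i for i in alive if texto[i + j] == padrao[j]]
--     return alive, comparacoes
-- ===== Notes on version B (the rewrite author's own statement) =====
-- stated objective: alternative
-- what changed: Replaces A's per-start-index inner matching loop by a breadth-first sieve: a single list of alive start positions is filtered once per pattern position j, with the comparison count read off as the number of alive positions at each step and the occurrences as the survivors.
import Mathlib
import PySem

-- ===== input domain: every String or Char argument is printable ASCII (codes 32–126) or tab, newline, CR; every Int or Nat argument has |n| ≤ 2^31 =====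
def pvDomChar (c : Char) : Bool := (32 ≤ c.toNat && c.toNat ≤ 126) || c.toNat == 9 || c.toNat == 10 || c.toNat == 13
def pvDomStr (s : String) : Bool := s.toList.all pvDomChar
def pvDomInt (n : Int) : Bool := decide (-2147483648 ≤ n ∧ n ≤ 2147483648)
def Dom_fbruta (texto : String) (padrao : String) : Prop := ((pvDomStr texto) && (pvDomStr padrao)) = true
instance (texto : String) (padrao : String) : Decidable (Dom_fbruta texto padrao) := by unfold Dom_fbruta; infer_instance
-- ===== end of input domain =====

-- B traverses the other axis: instead of fully matching each start index in turn, it sweeps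
-- pattern positions and filters one list of alive start positions (alternative decomposition, same cost).

-- ===== PORT A =====
-- inner while loop of A: returns (comparisons made, whether i was appended)
def fbrutaInner (tl pl : List Char) (i j : Nat) : Nat × Bool :=
  if j < pl.length then
    if tl.getD (i + j) ' ' == pl.getD j ' ' then
      if j + 1 = pl.length then (1, true)
      else
        let r := fbrutaInner tl pl i (j + 1)
        (r.1 + 1, r.2)
    else (1, false)
  else (0, false)
termination_by pl.length - j

def fbruta (texto : String) (padrao : String) : List Int × Int :=
  let tl := texto.toList
  let pl := padrao.toList
  let n := tl.length
  let m := pl.length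
  (List.range (n + 1 - m)).foldl
    (fun (acc : List Int × Int) i =>
      let r := fbrutaInner tl pl i 0
      (if r.2 then acc.1 ++ [(i : Int)] else acc.1, acc.2 + (r.1 : Int)))
    ([], 0)

-- ===== PORT B =====
def fbruta_alt (texto : String) (padrao : String) : List Int × Int :=
  let tl := texto.toList
  let pl := padrao.toList
  let n := tl.length
  let m := pl.length
  if m = 0 then ([], 0)
  else
    let r := (List.range m).foldl
      (fun (st : List Nat × Int) j =>
        (st.1.filter (fun i => tl.getD (i + j) ' ' == pl.getD j ' '), st.2 + (st.1.length : Int)))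
      (List.range (n + 1 - m), 0)
    (r.1.map (fun i : Nat => (i : Int)), r.2)

-- ===== PRECONDITION & SPEC =====
def Spec_fbruta (texto : String) (padrao : String) (out : List Int × Int) : Prop := out = fbruta_alt texto padrao
instance (texto : String) (padrao : String) (out : List Int × Int) : Decidable (Spec_fbruta texto padrao out) := by unfold Spec_fbruta; infer_instance

-- ===== CLAIM (what is proved, stated in full; the proofs are below) =====
def Claim_equal_fbruta : Prop := ∀ (texto : String) (padrao : String), Dom_fbruta texto padrao → Spec_fbruta texto padrao (fbruta texto padrao)

-- ===== LEMMAS AND PROOFS =====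

-- common prefix length (from position j) of padrao and texto[i:], capped at pl.length
def fbrutaPref (tl pl : List Char) (i j : Nat) : Nat :=
  if j < pl.length then
    if tl.getD (i + j) ' ' == pl.getD j ' ' then fbrutaPref tl pl i (j + 1)
    else j
  else j
termination_by pl.length - j

theorem fbrutaPref_ge (tl pl : List Char) (i j : Nat) : j ≤ fbrutaPref tl pl i j := by
  unfold fbrutaPref
  split
  · split
    · have := fbrutaPref_ge tl pl i (j + 1)
      omega
    · exact le_refl _
  · exact le_refl _
termination_by pl.length - j

theorem fbrutaPref_le (tl pl : List Char) (i j : Nat) (h : j ≤ pl.length) :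
    fbrutaPref tl pl i j ≤ pl.length := by
  unfold fbrutaPref
  split
  · split
    · exact fbrutaPref_le tl pl i (j + 1) (by omega)
    · omega
  · omega
termination_by pl.length - j

theorem fbrutaPref_match (tl pl : List Char) (i j : Nat) (h : j < pl.length)
    (hc : (tl.getD (i + j) ' ' == pl.getD j ' ') = true) :
    fbrutaPref tl pl i j = fbrutaPref tl pl i (j + 1) := by
  conv_lhs => rw [fbrutaPref]
  rw [if_pos h, if_pos hc]

theorem fbrutaPref_mismatch (tl pl : List Char) (i j : Nat) (h : j < pl.length)
    (hc : ¬ (tl.getD (i + j) ' ' == pl.getD j ' ') = true) :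
    fbrutaPref tl pl i j = j := by
  conv_lhs => rw [fbrutaPref]
  rw [if_pos h, if_neg hc]

theorem fbrutaPref_stop (tl pl : List Char) (i j : Nat) (h : ¬ j < pl.length) :
    fbrutaPref tl pl i j = j := by
  conv_lhs => rw [fbrutaPref]
  rw [if_neg h]

-- A's inner loop in terms of the prefix length
theorem fbrutaInner_eq (tl pl : List Char) (i j : Nat) (hj : j ≤ pl.length) :
    fbrutaInner tl pl i j =
      (if fbrutaPref tl pl i j = pl.length then pl.length - j
       else fbrutaPref tl pl i j - j + 1,
       decide (fbrutaPref tl pl i j = pl.length ∧ j < pl.length)) := by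
  rw [fbrutaInner]
  by_cases hlt : j < pl.length
  · rw [if_pos hlt]
    by_cases hc : (tl.getD (i + j) ' ' == pl.getD j ' ') = true
    · rw [if_pos hc, fbrutaPref_match tl pl i j hlt hc]
      by_cases hend : j + 1 = pl.length
      · rw [if_pos hend]
        have hp : fbrutaPref tl pl i (j + 1) = pl.length := by
          rw [fbrutaPref_stop tl pl i (j + 1) (by omega)]; exact hend
        rw [hp, if_pos rfl]
        have e1 : pl.length - j = 1 := by omega
        rw [e1]
        simp [hlt]
      · rw [if_neg hend, fbrutaInner_eq tl pl i (j + 1) (by omega)]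
        have h1 := fbrutaPref_ge tl pl i (j + 1)
        by_cases hm : fbrutaPref tl pl i (j + 1) = pl.length
        · rw [if_pos hm, if_pos hm]
          simp only [Prod.mk.injEq]
          refine ⟨by omega, ?_⟩
          simp [hm, hlt, show j + 1 < pl.length by omega]
        · rw [if_neg hm, if_neg hm]
          simp only [Prod.mk.injEq]
          refine ⟨by omega, ?_⟩
          simp [hm]
    · rw [if_neg hc, fbrutaPref_mismatch tl pl i j hlt hc]
      rw [if_neg (show ¬ j = pl.length by omega)]
      simp only [Prod.mk.injEq]
      refine ⟨by omega, ?_⟩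
      simp [show ¬ j = pl.length by omega]
  · rw [if_neg hlt, fbrutaPref_stop tl pl i j hlt]
    rw [if_pos (show j = pl.length by omega)]
    simp [hlt, show pl.length - j = 0 by omega]
termination_by pl.length - j

-- per-start-index comparison cost from step j onwards, in B's accounting
def fbrutaContr (tl pl : List Char) (j i : Nat) : Nat :=
  min (fbrutaPref tl pl i j + 1) pl.length - j

-- A's fold as filter + sum
theorem foldl_append_if_add {α : Type} (p : α → Bool) (f : α → Int) (g : α → Nat)
    (xs : List α) (l0 : List Int) (c0 : Int) :
    xs.foldl (fun (acc : List Int × Int) x =>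
        (if p x then acc.1 ++ [f x] else acc.1, acc.2 + (g x : Int))) (l0, c0) =
      (l0 ++ (xs.filter p).map f, c0 + ((xs.map g).sum : Int)) := by
  induction xs generalizing l0 c0 with
  | nil => simp
  | cons x t ih =>
    simp only [List.foldl_cons, List.filter_cons, List.map_cons, List.sum_cons]
    by_cases hp : p x = true
    · rw [if_pos hp, ih, hp]
      simp only [if_true, List.map_cons, List.append_assoc, List.singleton_append]
      simp only [Prod.mk.injEq, true_and]
      push_cast; ring
    · rw [if_neg hp, ih]
      simp only [hp, Bool.false_eq_true, if_false, Prod.mk.injEq, true_and]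
      push_cast; ring

-- B's loop invariant: the fold over pattern positions j .. m-1
theorem fbrutaLoop_eq (tl pl : List Char) (c j : Nat) (hc : j + c = pl.length)
    (alive : List Nat) (acc : Int) :
    (List.range' j c).foldl
      (fun (st : List Nat × Int) j =>
        (st.1.filter (fun i => tl.getD (i + j) ' ' == pl.getD j ' '), st.2 + (st.1.length : Int)))
      (alive, acc) =
    (alive.filter (fun i => decide (pl.length ≤ fbrutaPref tl pl i j)),
     acc + ((alive.map (fbrutaContr tl pl j)).sum : Int)) := by
  induction c generalizing j alive acc with
  | zero =>
    have hj : j = pl.length := by omega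
    subst hj
    simp only [List.range'_zero, List.foldl_nil]
    have h1 : alive.filter (fun i => decide (pl.length ≤ fbrutaPref tl pl i pl.length)) = alive := by
      apply List.filter_eq_self.mpr
      intro i _
      have := fbrutaPref_ge tl pl i pl.length
      simpa using this
    have h2 : ∀ i ∈ alive, fbrutaContr tl pl pl.length i = 0 := by
      intro i _
      unfold fbrutaContr
      rw [fbrutaPref_stop tl pl i pl.length (by omega)]
      omega
    rw [h1]
    have h3 : (alive.map (fbrutaContr tl pl pl.length)).sum = 0 := by
      rw [List.sum_eq_zero]
      intro x hx
      obtain ⟨i, hi, rfl⟩ := List.mem_map.mp hx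
      exact h2 i hi
    rw [h3]
    simp
  | succ c ih =>
    have hj : j < pl.length := by omega
    rw [List.range'_succ, List.foldl_cons]
    rw [ih (j + 1) (by omega)]
    simp only [Prod.mk.injEq]
    constructor
    · rw [List.filter_filter]
      apply List.filter_congr
      intro i _
      by_cases hm : (tl.getD (i + j) ' ' == pl.getD j ' ') = true
      · rw [fbrutaPref_match tl pl i j hj hm]
        simp only [hm, Bool.and_true]
      · have hm' : (tl.getD (i + j) ' ' == pl.getD j ' ') = false := by
          simpa using hm
        rw [fbrutaPref_mismatch tl pl i j hj hm]
        simp only [hm', Bool.and_false]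
        simp [show ¬ pl.length ≤ j by omega]
    · have key : alive.length + ((alive.filter
          (fun i => tl.getD (i + j) ' ' == pl.getD j ' ')).map (fbrutaContr tl pl (j + 1))).sum
          = (alive.map (fbrutaContr tl pl j)).sum := by
        induction alive with
        | nil => simp
        | cons i t iht =>
          simp only [List.length_cons, List.filter_cons, List.map_cons, List.sum_cons]
          by_cases hm : (tl.getD (i + j) ' ' == pl.getD j ' ') = true
          · rw [if_pos hm]
            simp only [List.map_cons, List.sum_cons]
            have hpp : fbrutaPref tl pl i j = fbrutaPref tl pl i (j + 1) :=
              fbrutaPref_match tl pl i j hj hm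
            have hge := fbrutaPref_ge tl pl i (j + 1)
            have : fbrutaContr tl pl j i = fbrutaContr tl pl (j + 1) i + 1 := by
              unfold fbrutaContr
              rw [hpp]
              omega
            omega
          · rw [if_neg hm]
            have hpp : fbrutaPref tl pl i j = j := fbrutaPref_mismatch tl pl i j hj hm
            have : fbrutaContr tl pl j i = 1 := by
              unfold fbrutaContr
              rw [hpp]
              omega
            omega
      rw [← key]
      push_cast
      ring

-- ===== VERDICT (by name: the statement is the Claim_ definition above) =====
theorem fbruta_spec : Claim_equal_fbruta := by
  intro texto padrao _
  unfold Spec_fbruta fbruta fbruta_alt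
  simp only
  set tl := texto.toList
  set pl := padrao.toList
  by_cases hm : pl.length = 0
  · -- m = 0: A's inner loop does nothing, B returns ([], 0) directly
    rw [if_pos hm]
    have hstep : ∀ (acc : List Int × Int) (i : Nat),
        (let r := fbrutaInner tl pl i 0
         ((if r.2 then acc.1 ++ [(i : Int)] else acc.1, acc.2 + (r.1 : Int)) : List Int × Int)) = acc := by
      intro acc i
      rw [fbrutaInner_eq tl pl i 0 (by omega)]
      have h0 : fbrutaPref tl pl i 0 = 0 := by
        rw [fbrutaPref_stop tl pl i 0 (by omega)]
      simp [hm, h0]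
    have : ∀ (k : Nat) (acc : List Int × Int),
        (List.range k).foldl
          (fun (acc : List Int × Int) i =>
            let r := fbrutaInner tl pl i 0
            (if r.2 then acc.1 ++ [(i : Int)] else acc.1, acc.2 + (r.1 : Int))) acc = acc := by
      intro k
      induction k with
      | zero => simp
      | succ k ihk =>
        intro acc
        rw [List.range_succ, List.foldl_append, ihk]
        simp only [List.foldl_cons, List.foldl_nil]
        exact hstep acc k
    exact this _ _
  · rw [if_neg hm]
    have hrange : List.range pl.length = List.range' 0 pl.length := List.range_eq_range'
    rw [hrange, fbrutaLoop_eq tl pl pl.length 0 (by omega) _ 0]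
    have hA : (List.range (tl.length + 1 - pl.length)).foldl
        (fun (acc : List Int × Int) i =>
          let r := fbrutaInner tl pl i 0
          (if r.2 then acc.1 ++ [(i : Int)] else acc.1, acc.2 + (r.1 : Int))) ([], 0) =
        (((List.range (tl.length + 1 - pl.length)).filter
            (fun i => decide (pl.length ≤ fbrutaPref tl pl i 0))).map (fun i : Nat => (i : Int)),
          0 + (((List.range (tl.length + 1 - pl.length)).map (fbrutaContr tl pl 0)).sum : Int)) := by
      have hcongr : ∀ (acc : List Int × Int) (i : Nat),
          (let r := fbrutaInner tl pl i 0
           ((if r.2 then acc.1 ++ [(i : Int)] else acc.1, acc.2 + (r.1 : Int)) : List Int × Int)) =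
          (if decide (pl.length ≤ fbrutaPref tl pl i 0) then acc.1 ++ [(i : Int)] else acc.1,
           acc.2 + ((fbrutaContr tl pl 0 i : Nat) : Int)) := by
        intro acc i
        rw [fbrutaInner_eq tl pl i 0 (by omega)]
        have hle := fbrutaPref_le tl pl i 0 (by omega)
        by_cases hfull : fbrutaPref tl pl i 0 = pl.length
        · have hc : fbrutaContr tl pl 0 i = pl.length := by
            unfold fbrutaContr; rw [hfull]; omega
          simp [hfull, hc, show 0 < pl.length by omega]
        · have hc : fbrutaContr tl pl 0 i = fbrutaPref tl pl i 0 + 1 := by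
            unfold fbrutaContr; omega
          simp [hfull, hc, show ¬ pl.length ≤ fbrutaPref tl pl i 0 by omega]
      calc (List.range (tl.length + 1 - pl.length)).foldl
            (fun (acc : List Int × Int) i =>
              let r := fbrutaInner tl pl i 0
              (if r.2 then acc.1 ++ [(i : Int)] else acc.1, acc.2 + (r.1 : Int))) ([], 0)
          = (List.range (tl.length + 1 - pl.length)).foldl
            (fun (acc : List Int × Int) i =>
              (if decide (pl.length ≤ fbrutaPref tl pl i 0) then acc.1 ++ [(i : Int)] else acc.1,
               acc.2 + ((fbrutaContr tl pl 0 i : Nat) : Int))) ([], 0) := by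
              have hfe : (fun (acc : List Int × Int) i =>
                  let r := fbrutaInner tl pl i 0
                  ((if r.2 then acc.1 ++ [(i : Int)] else acc.1, acc.2 + (r.1 : Int)) : List Int × Int)) =
                  (fun (acc : List Int × Int) i =>
                  (if decide (pl.length ≤ fbrutaPref tl pl i 0) then acc.1 ++ [(i : Int)] else acc.1,
                   acc.2 + ((fbrutaContr tl pl 0 i : Nat) : Int))) := by
                funext acc i
                exact hcongr acc i
              rw [hfe]
        _ = _ := by
              rw [foldl_append_if_add (fun i => decide (pl.length ≤ fbrutaPref tl pl i 0))
                (fun i : Nat => (i : Int)) (fbrutaContr tl pl 0) _ [] 0]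
              simp only [List.nil_append]
    rw [hA]
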